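-- pv_equiv track=rewrite | github.com/pypi-data/pypi-mirror-97 | packages/wildgram/wildgram-0.1.52.tar.gz/wildgram-0.1.52/wildgram/wildgram.py | getNoiseProfileLine
-- ===== SOURCE A (Python) =====
-- def getNoiseProfileLine(tokens, i):
--     if i == -1:
--         return ""
--     line = tokens[i]["token"]
--     if line.find(":") != -1:
--         line = line[line.find(":")+1:]
--     done = False
--     for j in range(i+1, len(tokens)):
--         if not done and tokens[j]["tokenType"] != "noise":
--             line = line + "<TOKEN>"
--         if tokens[j]["tokenType"] == "noise":
--             if done and "\n" not in tokens[j]["token"]: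
--                 continue
--             done = True
--             line = line + tokens[j]["token"]
--             if "\n" in tokens[j]["token"]:
--                 return line
--     return line
-- ===== SOURCE B (Python) =====
-- def getNoiseProfileLine(tokens, i):
--     if i == -1:
--         return ""
--     line = tokens[i]["token"]
--     if ":" in line:
--         line = line[line.index(":") + 1:]
--     rest = tokens[i + 1:]
--     k = next((j for j, t in enumerate(rest) if t["tokenType"] == "noise"), len(rest))
--     line += "<TOKEN>" * k
--     if k == len(rest):
--         return line
--     line += rest[k]["token"]
--     if "\n" in rest[k]["token"]:
--         return line
--     nl = next((t for t in rest[k + 1:] if t["tokenType"] == "noise" and "\n" in t["token"]), None)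
--     return line if nl is None else line + nl["token"]
-- ===== Notes on version B (the rewrite author's own statement) =====
-- stated objective: simpler
-- what changed: A's single flag-driven scan (done/early-return state mutated per token) is replaced by a staged decomposition: find the first noise token, append '<TOKEN>' * k in closed form, then at most one lookahead for the first newline-carrying noise token.
import Mathlib
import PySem

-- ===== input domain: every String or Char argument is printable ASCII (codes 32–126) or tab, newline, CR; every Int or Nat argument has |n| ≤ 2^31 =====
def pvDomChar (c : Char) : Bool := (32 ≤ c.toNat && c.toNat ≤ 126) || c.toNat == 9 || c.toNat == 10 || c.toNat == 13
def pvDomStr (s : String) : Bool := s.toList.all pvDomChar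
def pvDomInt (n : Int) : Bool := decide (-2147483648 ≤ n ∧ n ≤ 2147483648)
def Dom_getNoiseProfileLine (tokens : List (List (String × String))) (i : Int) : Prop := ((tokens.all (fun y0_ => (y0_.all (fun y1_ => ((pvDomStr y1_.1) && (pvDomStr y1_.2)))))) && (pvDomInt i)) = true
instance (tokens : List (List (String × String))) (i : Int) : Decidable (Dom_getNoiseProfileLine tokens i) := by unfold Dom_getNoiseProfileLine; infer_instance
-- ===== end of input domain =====

-- B replaces A's one stateful flag-driven scan by a staged decomposition: closed-form
-- "<TOKEN>" * k up to the first noise token, then at most one more lookahead for a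
-- newline-carrying noise token (objective: simpler decomposition, same cost).

-- ===== PORT A =====
-- loop body of A's 'for j in range(i+1, len(tokens))'; state = (line, done, returned)
def pvStepA (st : String × Bool × Bool) (t : List (String × String)) : String × Bool × Bool :=
  if st.2.2 then st else
  let ty := (t.lookup "tokenType").getD ""
  let line := if st.2.1 = false ∧ ty ≠ "noise" then st.1 ++ "<TOKEN>" else st.1
  if ty = "noise" then
    let w := (t.lookup "token").getD ""
    if st.2.1 = true ∧ PySem.Str.isIn "\n" w = false then (line, st.2.1, st.2.2)
    else
      let line := line ++ w
      if PySem.Str.isIn "\n" w then (line, true, true) else (line, true, false)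
  else (line, st.2.1, st.2.2)

def getNoiseProfileLine (tokens : List (List (String × String))) (i : Int) : String :=
  if i = -1 then "" else
    let tok := PySem.List.pyGetD tokens i []
    let line0 := (tok.lookup "token").getD ""
    let line1 := if PySem.Str.find line0 ":" ≠ -1 then
        PySem.Str.slice line0 (some (PySem.Str.find line0 ":" + 1)) none else line0
    ((PySem.List.pyRange (i+1) (tokens.length : Int) 1).foldl
      (fun st j => pvStepA st (PySem.List.pyGetD tokens j [])) (line1, false, false)).1

-- ===== PORT B =====
def pvIsNoise (t : List (String × String)) : Bool := (t.lookup "tokenType").getD "" == "noise"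

def pvNLNoise (t : List (String × String)) : Bool :=
  pvIsNoise t && PySem.Str.isIn "\n" ((t.lookup "token").getD "")

def getNoiseProfileLine_alt (tokens : List (List (String × String))) (i : Int) : String :=
  if i = -1 then "" else
    let tok := PySem.List.pyGetD tokens i []
    let line0 := (tok.lookup "token").getD ""
    let line1 := if PySem.Str.isIn ":" line0 then
        PySem.Str.slice line0 (some (PySem.Str.find line0 ":" + 1)) none else line0
    let rest := PySem.List.slice tokens (some (i+1)) none
    let k := rest.findIdx pvIsNoise
    let line2 := line1 ++ PySem.Str.join "" (List.replicate k "<TOKEN>")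
    match rest.drop k with
    | [] => line2
    | first :: r =>
      let w := (first.lookup "token").getD ""
      let line3 := line2 ++ w
      if PySem.Str.isIn "\n" w then line3
      else match r.find? pvNLNoise with
        | none => line3
        | some t => line3 ++ (t.lookup "token").getD ""

-- ===== PRECONDITION & SPEC =====
-- Pre_ excludes i < -1 (Python's negative-index wraparound makes A walk the list from an
-- accidental wrapped position — A still returns there, but that shape is no part of the
-- function's i = -1 / ordinary-index contract), indices out of range (IndexError) and
-- tokens missing the "token"/"tokenType" keys that the scan reads (KeyError).
def Pre_getNoiseProfileLine (tokens : List (List (String × String))) (i : Int) : Prop :=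
  i = -1 ∨ (0 ≤ i ∧ i < tokens.length ∧
    (tokens.getD i.toNat []).lookup "token" ≠ none ∧
    ∀ t ∈ tokens.drop (i.toNat + 1),
      t.lookup "tokenType" ≠ none ∧
      (t.lookup "tokenType" = some "noise" → t.lookup "token" ≠ none))
instance (tokens : List (List (String × String))) (i : Int) : Decidable (Pre_getNoiseProfileLine tokens i) := by unfold Pre_getNoiseProfileLine; infer_instance

def pvWitness_getNoiseProfileLine : (List (List (String × String))) × Int :=
  ([[("token", "a:b"), ("tokenType", "word")], [("token", "x\n"), ("tokenType", "noise")]], 0)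

def Spec_getNoiseProfileLine (tokens : List (List (String × String))) (i : Int) (out : String) : Prop := out = getNoiseProfileLine_alt tokens i
instance (tokens : List (List (String × String))) (i : Int) (out : String) : Decidable (Spec_getNoiseProfileLine tokens i out) := by unfold Spec_getNoiseProfileLine; infer_instance

-- ===== CLAIM (what is proved, stated in full; the proofs are below) =====
def Claim_equal_getNoiseProfileLine : Prop := ∀ (tokens : List (List (String × String))) (i : Int), Dom_getNoiseProfileLine tokens i → Pre_getNoiseProfileLine tokens i → Spec_getNoiseProfileLine tokens i (getNoiseProfileLine tokens i)

-- ===== LEMMAS AND PROOFS =====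

-- B's tail computation, factored for the loop-invariant lemmas
def pvTailFin (l : List (List (String × String))) (s : String) : String :=
  match l.find? pvNLNoise with
  | none => s
  | some t => s ++ (t.lookup "token").getD ""

def pvTail (l : List (List (String × String))) (s : String) : String :=
  let k := l.findIdx pvIsNoise
  let s2 := s ++ PySem.Str.join "" (List.replicate k "<TOKEN>")
  match l.drop k with
  | [] => s2
  | first :: r =>
    let w := (first.lookup "token").getD ""
    let s3 := s2 ++ w
    if PySem.Str.isIn "\n" w then s3 else pvTailFin r s3

lemma pvJoin_empty_nil : PySem.Str.join "" ([] : List String) = "" := by decide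

lemma pvJoin_empty_cons (x : String) (l : List String) :
    PySem.Str.join "" (x :: l) = x ++ PySem.Str.join "" l := by
  cases l with
  | nil => simp [PySem.Str.join, PySem.Chars.join_nil, PySem.Chars.join_singleton]
  | cons y r => simp [PySem.Str.join, PySem.Chars.join_cons_cons]

-- once A has returned (third flag true), the fold is the identity
lemma pvFold_fin (l : List (List (String × String))) (s : String) (d : Bool) :
    l.foldl pvStepA (s, d, true) = (s, d, true) := by
  induction l with
  | nil => rfl
  | cons t r ih => simpa [pvStepA] using ih

-- after the first noise token (done = true, not returned): only the first
-- newline-carrying noise token is appended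
lemma pvFold_done (l : List (List (String × String))) (s : String) :
    (l.foldl pvStepA (s, true, false)).1 = pvTailFin l s := by
  induction l generalizing s with
  | nil => simp [pvTailFin]
  | cons t r ih =>
    by_cases hn : pvIsNoise t = true
    · have hty : (t.lookup "tokenType").getD "" = "noise" := by
        simpa [pvIsNoise] using hn
      by_cases hw : PySem.Chars.isIn ['\n'] ((t.lookup "token").getD "").toList = true
      · simp [List.foldl_cons, pvStepA, hty, hw, pvFold_fin, pvTailFin,
          pvNLNoise, hn]
      · simp only [Bool.not_eq_true] at hw
        simp [List.foldl_cons, pvStepA, hty, hw, ih, pvTailFin,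
          pvNLNoise, hn]
    · have hty : ¬ (t.lookup "tokenType").getD "" = "noise" := by
        simpa [pvIsNoise] using hn
      simp [List.foldl_cons, pvStepA, hty, ih, pvTailFin, pvNLNoise,
        Bool.eq_false_iff.mpr hn]

-- main invariant: A's scan from the fresh state computes B's staged tail
lemma pvFold_main (l : List (List (String × String))) (s : String) :
    (l.foldl pvStepA (s, false, false)).1 = pvTail l s := by
  induction l generalizing s with
  | nil => simp [pvTail, pvJoin_empty_nil]
  | cons t r ih =>
    by_cases hn : pvIsNoise t = true
    · have hty : (t.lookup "tokenType").getD "" = "noise" := by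
        simpa [pvIsNoise] using hn
      by_cases hw : PySem.Chars.isIn ['\n'] ((t.lookup "token").getD "").toList = true
      · simp [List.foldl_cons, pvStepA, hty, hw, pvFold_fin, pvTail, List.findIdx_cons,
          hn, pvJoin_empty_nil]
      · simp only [Bool.not_eq_true] at hw
        simp [List.foldl_cons, pvStepA, hty, hw, pvFold_done, pvTail, List.findIdx_cons,
          hn, pvJoin_empty_nil]
    · have hty : ¬ (t.lookup "tokenType").getD "" = "noise" := by
        simpa [pvIsNoise] using hn
      have step : List.foldl pvStepA (s, false, false) (t :: r)
          = List.foldl pvStepA (s ++ "<TOKEN>", false, false) r := by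
        simp [List.foldl_cons, pvStepA, hty]
      rw [step, ih]
      simp only [pvTail, pvTailFin, List.findIdx_cons, Bool.eq_false_iff.mpr hn,
        cond_false, List.drop_succ_cons, List.replicate_succ, pvJoin_empty_cons]
      simp only [String.append_assoc]

-- ===== VERDICT (by name: the statement is the Claim_ definition above) =====
theorem getNoiseProfileLine_spec : Claim_equal_getNoiseProfileLine := by
  intro tokens i _hdom hpre
  unfold Spec_getNoiseProfileLine
  rcases hpre with hi | ⟨hi0, hilt, -, -⟩
  · subst hi; rfl
  · have hne : ¬ i = -1 := by omega
    have hi1 : (0 : Int) ≤ i + 1 := by omega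
    simp only [getNoiseProfileLine, getNoiseProfileLine_alt, if_neg hne]
    rw [PySem.List.foldl_pyRange_pyGetD' tokens ([] : List (String × String)) pvStepA _ hi1,
      PySem.List.slice_from tokens hi1, pvFold_main]
    have hcol : (PySem.Str.find (((PySem.List.pyGetD tokens i ([] : List (String × String))).lookup "token").getD "") ":" ≠ -1)
        = (PySem.Str.isIn ":" (((PySem.List.pyGetD tokens i ([] : List (String × String))).lookup "token").getD "") = true) := by
      simp only [eq_iff_iff]
      rw [PySem.Str.find_ne_neg_one_iff, PySem.Str.isIn_iff_infix]
    simp only [pvTail, pvTailFin, hcol]
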